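-- pv_equiv track=rewrite | github.com/flo-bou/adventofcode24 | day6/day6_part1.py | to_North
-- ===== SOURCE A (Python) =====
-- def to_North(carte: list, guard_position: list):
--     # trouver le prochain '#' dans la direction de déplacement du garde
--     positions_traveled: set = set()
--     after_guard: bool = False
--     final_guard_position: list = list()
--     for line_index, line in reversed(list(enumerate(carte))):
--         # trouver la ligne du garde
--         if line_index == guard_position[0]:
--             after_guard = True
--         if after_guard:
--             if line[guard_position[1]] == '#':
--                 final_guard_position = [line_index+1, guard_position[1]]
--                 break
--             else:
--                 positions_traveled.add((line_index, guard_position[1]))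
--     # # si aucun '#' n'a été atteint, alors le garde est sorti de la carte
--     # if final_guard_position == []:
--     #     final_guard_position = None
--     return final_guard_position, "East", positions_traveled
-- ===== SOURCE B (Python) =====
-- def _wall_row(carte, c, r):
--     # nearest wall at or above row r in column c, or None if the column is clear
--     i = r
--     while i >= 0:
--         if carte[i][c] == '#':
--             return i
--         i -= 1
--     return None
--
--
-- def to_North(carte, guard_position):
--     # locate-then-enumerate: find the nearest wall row above the guard with a
--     # bare search (no accumulation), then produce the final position and the
--     # traveled cells arithmetically from a range.
--     r = guard_position[0]
--     if not (0 <= r < len(carte)):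
--         return [], "East", set()
--     c = guard_position[1]
--     w = _wall_row(carte, c, r)
--     stop = -1 if w is None else w
--     final = [] if w is None else [w + 1, c]
--     return final, "East", {(k, c) for k in range(r, stop, -1)}
-- ===== Notes on version B (the rewrite author's own statement) =====
-- stated objective: alternative
-- what changed: Replaces A's single interleaved loop over a materialized reversed enumerate list (flag state, set grown cell by cell, break) with a locate-then-enumerate decomposition: a helper walks up to the nearest wall row carrying no accumulator, then the final position and the traveled set are produced in one range comprehension.
-- outside the precondition, e.g. on to_North([], []): A returns ([], 'East', set()), B raises IndexError
import Mathlib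
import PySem

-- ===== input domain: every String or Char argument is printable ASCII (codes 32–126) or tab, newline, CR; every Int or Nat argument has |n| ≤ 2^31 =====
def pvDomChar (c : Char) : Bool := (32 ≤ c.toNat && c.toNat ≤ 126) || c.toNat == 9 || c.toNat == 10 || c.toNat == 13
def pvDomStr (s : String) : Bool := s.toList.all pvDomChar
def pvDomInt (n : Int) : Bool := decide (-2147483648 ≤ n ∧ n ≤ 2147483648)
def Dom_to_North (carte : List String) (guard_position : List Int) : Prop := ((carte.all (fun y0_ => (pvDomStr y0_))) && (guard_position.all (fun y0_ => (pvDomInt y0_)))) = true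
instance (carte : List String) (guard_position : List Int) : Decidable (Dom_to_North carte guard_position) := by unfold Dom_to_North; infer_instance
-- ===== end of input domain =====

-- B replaces A's interleaved scan-and-accumulate with a locate-then-enumerate decomposition (wall search without an accumulator, traveled set from a range); same asymptotic cost.

-- ===== PORT A =====
-- A's for-loop over reversed(list(enumerate(carte))) with the traveled set, the
-- after_guard flag and break; break returns the final triple directly.
def toNorthLoopA (g0 g1 : Int) : List (Int × String) → PySem.Set (Int × Int) → Bool → List Int × String × List (Int × Int)
  | [], trav, _ => ([], "East", trav)
  | (i, line) :: rest, trav, after =>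
      let a := after || decide (i = g0)
      if a then
        if PySem.Str.pyGet? line g1 = some '#' then ([i + 1, g1], "East", trav)
        else toNorthLoopA g0 g1 rest (PySem.Set.add trav (i, g1)) a
      else toNorthLoopA g0 g1 rest trav a

def to_North (carte : List String) (guard_position : List Int) : List Int × String × (List (Int × Int)) :=
  let g0 := PySem.List.pyGetD guard_position 0 0
  let g1 := PySem.List.pyGetD guard_position 1 0
  toNorthLoopA g0 g1 (PySem.List.enumerate carte 0).reverse PySem.Set.empty false

-- ===== PORT B =====
-- B's helper _wall_row: the while-loop 'i = r; while i >= 0: … i -= 1' counting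
-- down; the Nat argument is the number of rows still to scan (i+1), so
-- wallRowB … (k) scans rows k-1, k-2, …, 0 and returns the first wall row or none.
def wallRowB (carte : List String) (c : Int) : Nat → Option Int
  | 0 => none
  | i + 1 =>
      if PySem.Str.pyGet? (PySem.List.pyGetD carte (i : Int) "") c = some '#' then some (i : Int)
      else wallRowB carte c i

def to_North_alt (carte : List String) (guard_position : List Int) : List Int × String × (List (Int × Int)) :=
  let r := PySem.List.pyGetD guard_position 0 0
  if ¬ (0 ≤ r ∧ r < (carte.length : Int)) then ([], "East", []) else
  let c := PySem.List.pyGetD guard_position 1 0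
  let w := wallRowB carte c (r.toNat + 1)
  let stop : Int := match w with | none => -1 | some v => v
  let final : List Int := match w with | none => [] | some v => [v + 1, c]
  (final, "East", PySem.Set.ofList ((PySem.List.pyRange r stop (-1)).map (fun k => (k, c))))

-- ===== PRECONDITION & SPEC =====
-- Pre_ admits exactly the inputs on which Python A returns normally, except one
-- corner: it also requires guard_position to be nonempty, which A only needs when
-- carte is nonempty — on ([], []) A happens to return before ever reading
-- guard_position (an accident of loop order) while B naturally raises (see cites).
def Pre_to_North (carte : List String) (guard_position : List Int) : Prop :=
  1 ≤ guard_position.length ∧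
    ((0 ≤ PySem.List.pyGetD guard_position 0 0 ∧
      PySem.List.pyGetD guard_position 0 0 < (carte.length : Int)) →
      (2 ≤ guard_position.length ∧
        ∀ i : Nat, (i : Int) ≤ PySem.List.pyGetD guard_position 0 0 →
          (∀ j : Nat, i < j → (j : Int) ≤ PySem.List.pyGetD guard_position 0 0 →
            PySem.Str.pyGet? (carte.getD j "") (PySem.List.pyGetD guard_position 1 0) ≠ some '#') →
          PySem.Raise.InRange (carte.getD i "").toList.length
            (PySem.List.pyGetD guard_position 1 0)))
instance (carte : List String) (guard_position : List Int) : Decidable (Pre_to_North carte guard_position) := by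
  unfold Pre_to_North
  have I : ∀ g0 g1 : Int, Decidable (∀ i : Nat, (i : Int) ≤ g0 →
      (∀ j : Nat, i < j → (j : Int) ≤ g0 →
        PySem.Str.pyGet? (carte.getD j "") g1 ≠ some '#') →
      PySem.Raise.InRange (carte.getD i "").toList.length g1) := by
    intro g0 g1
    refine decidable_of_iff ((fun n : Nat => (List.range n).all
      (fun i => decide ((∀ j ∈ List.range n, i < j →
          PySem.Str.pyGet? (carte.getD j "") g1 ≠ some '#') →
        PySem.Raise.InRange (carte.getD i "").toList.length g1))) ((g0 + 1).toNat) = true) ?_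
    simp only [List.all_eq_true, List.mem_range, decide_eq_true_eq]
    constructor
    · intro h i hi hwalls
      by_cases hc : i < (g0 + 1).toNat
      · exact h i hc (fun j hj hij => hwalls j hij (by omega))
      · exact absurd hi (by omega)
    · intro h i hi hwalls
      exact h i (by omega) (fun j hij hj => hwalls j (by omega) hij)
  exact inferInstance

def pvWitness_to_North : List String × List Int := (["....", "..#.", "....", "...."], [3, 2])

def Spec_to_North (carte : List String) (guard_position : List Int) (out : List Int × String × (List (Int × Int))) : Prop := out = to_North_alt carte guard_position
instance (carte : List String) (guard_position : List Int) (out : List Int × String × (List (Int × Int))) : Decidable (Spec_to_North carte guard_position out) := by unfold Spec_to_North; infer_instance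

-- ===== CLAIM =====
def Claim_equal_to_North : Prop := ∀ (carte : List String) (guard_position : List Int), Dom_to_North carte guard_position → Pre_to_North carte guard_position → Spec_to_North carte guard_position (to_North carte guard_position)

-- ===== LEMMAS AND PROOFS =====

-- rows whose index differs from g0 are skipped while after_guard is false
lemma loopA_skip (g0 g1 : Int) (L M : List (Int × String)) (trav : PySem.Set (Int × Int))
    (h : ∀ p ∈ L, p.1 ≠ g0) :
    toNorthLoopA g0 g1 (L ++ M) trav false = toNorthLoopA g0 g1 M trav false := by
  induction L with
  | nil => rfl
  | cons p rest ih =>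
      obtain ⟨i, line⟩ := p
      have hi : i ≠ g0 := h (i, line) (by simp)
      simp only [List.cons_append, toNorthLoopA, Bool.false_or, decide_eq_false hi]
      exact ih (fun q hq => h q (by simp [hq]))

-- the wall row found by B's search is below the number of rows scanned
lemma wallRowB_lt (carte : List String) (c : Int) (k : Nat) (v : Int)
    (h : wallRowB carte c k = some v) : v < (k : Int) := by
  induction k with
  | zero => simp [wallRowB] at h
  | succ i ih =>
      by_cases hw : PySem.Str.pyGet? (PySem.List.pyGetD carte (i : Int) "") c = some '#'
      · simp only [wallRowB, hw, if_true, Option.some.injEq] at h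
        omega
      · simp only [wallRowB, hw, if_false] at h
        have := ih h
        push_cast
        omega

-- the descent over rows k-1 … 0 with after_guard on (or switching on at the head
-- row) equals B's locate-then-enumerate value
lemma loopA_descend (carte : List String) (g0 g1 : Int) (k : Nat)
    (trav : PySem.Set (Int × Int)) (b : Bool)
    (hb : b = true ∨ (k : Int) - 1 = g0)
    (htrav : ∀ i : Int, i ≤ (k : Int) - 1 → (i, g1) ∉ trav) :
    toNorthLoopA g0 g1
        ((PySem.List.pyRange ((k : Int) - 1) (-1) (-1)).map
          (fun j => (j, PySem.List.pyGetD carte j ""))) trav b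
      = (let w := wallRowB carte g1 k
         ((match w with | none => ([] : List Int) | some v => [v + 1, g1]), "East",
          trav ++ (PySem.List.pyRange ((k : Int) - 1)
            (match w with | none => (-1 : Int) | some v => v) (-1)).map (fun i => (i, g1)))) := by
  induction k generalizing trav b with
  | zero =>
      simp [PySem.List.pyRange_neg_one_eq_nil, toNorthLoopA, wallRowB]
  | succ k ih =>
      rw [show ((k + 1 : Nat) : Int) - 1 = (k : Int) from by push_cast; ring] at *
      rw [PySem.List.pyRange_neg_one_cons (show (-1 : Int) < (k : Int) from by omega)]
      have ha : (b || decide ((k : Int) = g0)) = true := by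
        rcases hb with hb | hb
        · simp [hb]
        · have : (k : Int) = g0 := by omega
          simp [this]
      by_cases hw : PySem.Str.pyGet? (PySem.List.pyGetD carte (k : Int) "") g1 = some '#'
      · -- wall found at row k
        simp only [List.map_cons, toNorthLoopA, ha, if_true, hw, wallRowB]
        have : PySem.List.pyRange (k : Int) (k : Int) (-1) = [] :=
          PySem.List.pyRange_neg_one_eq_nil le_rfl
        simp [this]
      · -- no wall at row k: travel and recurse
        have hadd : PySem.Set.add trav ((k : Int), g1) = trav ++ [((k : Int), g1)] :=
          PySem.Set.add_of_not_mem (htrav _ (by omega))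
        have ihres := ih (trav ++ [((k : Int), g1)]) true (Or.inl rfl)
          (by
            intro i hi
            simp only [List.mem_append, List.mem_singleton]
            rintro (h1 | h1)
            · exact htrav i (by omega) h1
            · have : i = (k : Int) := congrArg Prod.fst h1
              omega)
        simp only [List.map_cons, toNorthLoopA, ha, if_true, hw, if_false, hadd,
          wallRowB] at ihres ⊢
        rw [ihres]
        have hstop : (match wallRowB carte g1 k with
            | none => (-1 : Int) | some v => v) < (k : Int) := by
          cases h : wallRowB carte g1 k with
          | none => simp; omega
          | some v => simpa using wallRowB_lt carte g1 k v h
        rw [PySem.List.pyRange_neg_one_cons hstop]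
        simp

-- the whole of A's loop when the guard row index matches no row: nothing happens
lemma loopA_main_neg (carte : List String) (g0 g1 : Int)
    (h : ¬ (0 ≤ g0 ∧ g0 < (carte.length : Int))) :
    toNorthLoopA g0 g1 (PySem.List.enumerate carte 0).reverse PySem.Set.empty false
      = ([], "East", []) := by
  rw [PySem.List.enumerate_eq_map_pyRange (d := "")]
  rw [← List.append_nil (((PySem.List.pyRange 0 (PySem.List.len carte) 1).map
      (fun j => (j, PySem.List.pyGetD carte j ""))).reverse)]
  rw [loopA_skip g0 g1 _ [] PySem.Set.empty (by
    intro p hp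
    simp only [List.mem_reverse, List.mem_map] at hp
    obtain ⟨j, hj, rfl⟩ := hp
    have := (PySem.List.mem_pyRange_one).mp hj
    simp only [PySem.List.len_eq] at this
    simp only []
    omega)]
  rfl

-- the whole of A's loop when the guard is on the map: B's locate-then-enumerate value
lemma loopA_main_pos (carte : List String) (g0 g1 : Int)
    (hpos : 0 ≤ g0) (hlt : g0 < (carte.length : Int)) :
    toNorthLoopA g0 g1 (PySem.List.enumerate carte 0).reverse PySem.Set.empty false
      = (let w := wallRowB carte g1 (g0.toNat + 1)
         ((match w with | none => ([] : List Int) | some v => [v + 1, g1]), "East",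
          PySem.Set.ofList ((PySem.List.pyRange g0
            (match w with | none => (-1 : Int) | some v => v) (-1)).map (fun i => (i, g1))))) := by
  -- split the reversed enumeration at the guard row
  have hsplit : (PySem.List.enumerate carte 0).reverse
      = (((PySem.List.pyRange (g0 + 1) (carte.length : Int) 1).map
          (fun j => (j, PySem.List.pyGetD carte j ""))).reverse)
        ++ ((PySem.List.pyRange g0 (-1) (-1)).map
          (fun j => (j, PySem.List.pyGetD carte j ""))) := by
    rw [PySem.List.enumerate_eq_map_pyRange (d := "")]
    rw [show PySem.List.len carte = (carte.length : Int) from by simp]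
    rw [PySem.List.pyRange_one_append 0 (g0 + 1) (carte.length : Int) (by omega) (by omega)]
    rw [List.map_append, List.reverse_append]
    rw [PySem.List.pyRange_neg_one_eq_reverse]
    rw [← List.map_reverse]
    norm_num
  rw [hsplit, loopA_skip g0 g1 _ _ _ (by
    intro p hp
    simp only [List.mem_reverse, List.mem_map] at hp
    obtain ⟨j, hj, rfl⟩ := hp
    have := (PySem.List.mem_pyRange_one).mp hj
    simp only []
    omega)]
  have hg : ((g0.toNat + 1 : Nat) : Int) - 1 = g0 := by
    push_cast
    rw [Int.toNat_of_nonneg hpos]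
    ring
  have hd := loopA_descend carte g0 g1 (g0.toNat + 1) PySem.Set.empty false
    (Or.inr (by omega))
    (by intro i _ hmem; simp [PySem.Set.empty] at hmem)
  rw [hg] at hd
  rw [hd]
  have hnodup : ((PySem.List.pyRange g0
      (match wallRowB carte g1 (g0.toNat + 1) with | none => (-1 : Int) | some v => v)
      (-1)).map (fun i => (i, g1))).Nodup := by
    apply List.Nodup.map
    · intro a b hab; simpa using congrArg Prod.fst hab
    · rw [PySem.List.pyRange_neg_one_eq_reverse]
      exact (List.nodup_reverse).mpr (PySem.List.nodup_pyRange_one _ _)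
  dsimp only
  simp only [PySem.Set.empty, List.nil_append,
    PySem.Set.ofList_eq_self_of_nodup _ hnodup]

-- ===== VERDICT =====
theorem to_North_spec : Claim_equal_to_North := by
  intro carte gp _ _
  unfold Spec_to_North to_North to_North_alt
  by_cases hr : 0 ≤ PySem.List.pyGetD gp 0 0 ∧
      PySem.List.pyGetD gp 0 0 < (carte.length : Int)
  · rw [if_neg (by simpa using hr)]
    rw [loopA_main_pos carte _ _ hr.1 hr.2]
  · rw [if_pos (by simpa using hr)]
    rw [loopA_main_neg carte _ _ hr]
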